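-- pv_equiv track=rewrite | github.com/quantsnd/reddit | analyze.py | tickerFrequency
-- ===== SOURCE A (Python) =====
-- def tickerFrequency(tickers, body, ticker_count):
--     words = str(body).split(' ')
--     for word in words:
--         if word in tickers:
--             if word in ticker_count:
--                 ticker_count[word] += 1
--             else:
--                 ticker_count[word] = 1
--     return ticker_count
-- ===== SOURCE B (Python) =====
-- def tickerFrequency(tickers, body, ticker_count):
--     hits = [w for w in str(body).split(' ') if w in tickers]
--     counts = {}
--     for w in hits:
--         counts[w] = counts.get(w, 0) + 1
--     for w, n in counts.items():
--         ticker_count[w] = ticker_count.get(w, 0) + n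
--     return ticker_count
-- ===== Notes on version B (the rewrite author's own statement) =====
-- stated objective: alternative
-- what changed: B is a staged pipeline: it filters the matching words, builds a separate frequency table (counter dict) in one pass, and then merges that table into the caller's dict with one unconditional get+insert per distinct ticker word, instead of A's single pass that conditionally increments the caller's dict once per word.
import Mathlib
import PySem

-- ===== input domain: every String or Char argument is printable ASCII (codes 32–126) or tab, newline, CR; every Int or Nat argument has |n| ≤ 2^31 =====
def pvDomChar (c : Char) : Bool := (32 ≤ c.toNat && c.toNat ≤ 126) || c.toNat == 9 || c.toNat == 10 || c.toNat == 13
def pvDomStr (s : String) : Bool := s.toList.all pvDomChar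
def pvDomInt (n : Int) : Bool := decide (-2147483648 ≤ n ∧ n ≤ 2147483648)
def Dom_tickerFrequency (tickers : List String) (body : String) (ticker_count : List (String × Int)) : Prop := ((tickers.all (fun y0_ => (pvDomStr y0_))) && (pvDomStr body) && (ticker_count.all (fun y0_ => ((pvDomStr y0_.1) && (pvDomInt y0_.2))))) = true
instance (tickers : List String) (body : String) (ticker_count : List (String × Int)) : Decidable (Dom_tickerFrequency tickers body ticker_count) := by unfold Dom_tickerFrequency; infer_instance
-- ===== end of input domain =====

-- B is a staged pipeline (filter matches, build a separate frequency table, merge it into the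
-- caller's dict) instead of A's single conditional-increment pass; same cost class, alternative shape.
-- Both A and B mutate the caller's ticker_count dict; the equivalence proved is about the return value.

-- ===== PORT A =====
def tickerFrequency (tickers : List String) (body : String) (ticker_count : List (String × Int)) : List (String × Int) :=
  -- sep " " is nonempty, so split? is always some; .getD [] never fires
  let words := (PySem.Str.split? body " ").getD []
  (words.foldl (fun d word =>
      if tickers.contains word then
        if d.contains word then d.insert word (d.getD word 0 + 1)
        else d.insert word 1
      else d)
    (PySem.Dict.ofList ticker_count)).items

-- ===== PORT B =====
def tickerFrequency_alt (tickers : List String) (body : String) (ticker_count : List (String × Int)) : List (String × Int) :=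
  -- sep " " is nonempty, so split? is always some; .getD [] never fires
  let hits := ((PySem.Str.split? body " ").getD []).filter (fun w => tickers.contains w)
  let counts := hits.foldl (fun c w => c.insert w (c.getD w 0 + 1)) PySem.Dict.empty
  (counts.items.foldl (fun d p => d.insert p.1 (d.getD p.1 0 + p.2))
    (PySem.Dict.ofList ticker_count)).items

-- ===== PRECONDITION & SPEC =====
def Spec_tickerFrequency (tickers : List String) (body : String) (ticker_count : List (String × Int)) (out : List (String × Int)) : Prop := out = tickerFrequency_alt tickers body ticker_count
instance (tickers : List String) (body : String) (ticker_count : List (String × Int)) (out : List (String × Int)) : Decidable (Spec_tickerFrequency tickers body ticker_count out) := by unfold Spec_tickerFrequency; infer_instance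

-- ===== CLAIM (what is proved, stated in full; the proofs are below) =====
def Claim_equal_tickerFrequency : Prop := ∀ (tickers : List String) (body : String) (ticker_count : List (String × Int)), Dom_tickerFrequency tickers body ticker_count → Spec_tickerFrequency tickers body ticker_count (tickerFrequency tickers body ticker_count)

-- ===== LEMMAS AND PROOFS =====

-- A's two-branch increment is a single insert (in the missing case getD gives 0).
lemma stepA_eq (d : PySem.Dict String Int) (w : String) :
    (if d.contains w then d.insert w (d.getD w 0 + 1) else d.insert w 1)
      = d.insert w (d.getD w 0 + 1) := by
  split_ifs with h
  · rfl
  · rw [PySem.Dict.getD_of_not_contains d 0 (by simpa using h)]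
    norm_num

-- value table of B's merge fold: one insert per (distinct) key
lemma getD_merge_fold (h : List String) (L : List String) (hL : L.Nodup)
    (d : PySem.Dict String Int) (v : String) :
    (L.foldl (fun e w => e.insert w (e.getD w 0 + (h.count w : Int))) d).getD v 0 =
      d.getD v 0 + (if v ∈ L then (h.count v : Int) else 0) := by
  induction L generalizing d with
  | nil => simp
  | cons w rest ih =>
    simp only [List.nodup_cons] at hL
    rw [List.foldl_cons, ih hL.2]
    rw [PySem.Dict.getD_insert]
    by_cases hv : v = w
    · subst hv
      have : v ∉ rest := hL.1
      simp [this]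
    · simp [hv, List.mem_cons]

-- the central equality: A's per-occurrence increment fold equals B's merge of the
-- frequency table (one insert per distinct word, adding its total count)
lemma folds_eq (h : List String) (d : PySem.Dict String Int) (hd : d.keys.Nodup) :
    h.foldl (fun e w => e.insert w (e.getD w 0 + 1)) d
      = (PySem.Set.ofList h).foldl (fun e w => e.insert w (e.getD w 0 + (h.count w : Int))) d := by
  apply PySem.Dict.ext
  have hndA := PySem.Dict.nodup_keys_foldl_insert h (fun e w => e.getD w 0 + 1) d hd
  have hndB := PySem.Dict.nodup_keys_foldl_insert (PySem.Set.ofList h)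
      (fun e w => e.getD w 0 + (h.count w : Int)) d hd
  rw [PySem.Dict.items_eq_map_keys _ hndA 0, PySem.Dict.items_eq_map_keys _ hndB 0]
  have hkeys : (h.foldl (fun e w => e.insert w (e.getD w 0 + 1)) d).keys
      = ((PySem.Set.ofList h).foldl (fun e w => e.insert w (e.getD w 0 + (h.count w : Int))) d).keys := by
    rw [PySem.Dict.keys_foldl_insert, PySem.Dict.keys_foldl_insert]
    rw [PySem.Set.update_eq_append_filter, PySem.Set.update_eq_append_filter]
    simp [PySem.Set.ofList_ofList]
  rw [← hkeys]
  apply List.map_congr_left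
  intro k _
  rw [PySem.Dict.getD_foldl_insert_add_one,
      getD_merge_fold h (PySem.Set.ofList h) (PySem.Set.nodup_ofList h) d k]
  by_cases hk : k ∈ h
  · simp [hk, PySem.Set.mem_ofList]
  · simp [hk, PySem.Set.mem_ofList, List.count_eq_zero.mpr hk]

-- ===== VERDICT (by name: the statement is the Claim_ definition above) =====
theorem tickerFrequency_spec : Claim_equal_tickerFrequency := by
  intro tickers body ticker_count _
  unfold Spec_tickerFrequency tickerFrequency tickerFrequency_alt
  dsimp only
  -- A: fuse the two branches, then push the membership test into a filter
  rw [PySem.List.foldl_congr_mem' _ _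
        (fun e w => if tickers.contains w then e.insert w (e.getD w 0 + 1) else e) _
        (by intro w _ e; by_cases hw : tickers.contains w <;> simp [stepA_eq])]
  rw [← List.foldl_filter]
  -- B: the counting fold is Counter(hits); its items are (distinct word, total count) pairs
  rw [PySem.Dict.foldl_insert_getD_add_one_eq_counter, PySem.Dict.items_counter, List.foldl_map]
  exact congrArg PySem.Dict.items (folds_eq _ _ (PySem.Dict.nodup_keys_ofList _))
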